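-- pv_equiv track=rewrite | github.com/SmishkaS/Algorithms_and_data_structures_in_Python- | Algorithms_DZ4_1.py | teacher_version
-- ===== SOURCE A (Python) =====
-- def teacher_version(matrix):
--     max_ = None
--
--     for j in range(len(matrix[0])):
--         min_ = matrix[0][j]
--
--         for i in range(len(matrix)):
--             if matrix[i][j] < min_:
--                 min_ = matrix[i][j]
--
--         if max_ is None or max_ < min_:
--             max_ = min_
--     return max_
-- ===== SOURCE B (Python) =====
-- def teacher_version(matrix):
--     # one row-major pass: running per-column minimums, then the max of that table
--     col_mins = list(matrix[0])
--     for row in matrix[1:]: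
--         col_mins = [m if m <= v else v for m, v in zip(col_mins, row)]
--     return max(col_mins)
-- ===== Notes on version B (the rewrite author's own statement) =====
-- stated objective: alternative
-- what changed: A scans column-major with nested index loops (repeated matrix[i][j] indexing) interleaved with the max update; B makes one row-major pass maintaining a per-column running-minimums table via zip, then takes max() of the table.
-- outside the precondition, e.g. on teacher_version([[]]): A returns None, B raises ValueError; on teacher_version([]): A raises IndexError, B raises IndexError; on teacher_version([[1, 2], [3]]): A raises IndexError, B returns 1
import Mathlib
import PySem

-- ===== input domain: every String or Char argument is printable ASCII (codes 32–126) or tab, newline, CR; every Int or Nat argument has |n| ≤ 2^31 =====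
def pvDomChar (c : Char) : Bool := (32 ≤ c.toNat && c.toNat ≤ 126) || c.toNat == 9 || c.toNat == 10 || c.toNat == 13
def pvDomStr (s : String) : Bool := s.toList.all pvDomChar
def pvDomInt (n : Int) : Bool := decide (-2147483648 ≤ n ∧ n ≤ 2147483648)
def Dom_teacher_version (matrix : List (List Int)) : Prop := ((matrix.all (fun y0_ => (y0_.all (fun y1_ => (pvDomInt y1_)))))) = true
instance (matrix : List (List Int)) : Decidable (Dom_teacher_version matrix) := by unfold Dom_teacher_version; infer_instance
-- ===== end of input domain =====

-- B replaces A's column-major nested index loops by one row-major fold of a running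
-- per-column-minimums table followed by max() (objective: alternative decomposition, same asymptotics).

-- ===== PORT A =====
-- literal port of A: for j in range(len(matrix[0])): scan all rows for the column min,
-- fold that into max_ : Option Int (None = Python's initial max_); the final .getD 0 is
-- only reached outside Pre_ (where Python A returns None or raises).
def teacher_version (matrix : List (List Int)) : Int :=
  let row0 := PySem.List.pyGetD matrix 0 []
  let max_ : Option Int :=
    (PySem.List.pyRange 0 (row0.length : Int) 1).foldl
      (fun max_ j =>
        let min0 := PySem.List.pyGetD row0 j 0
        let min_ :=
          (PySem.List.pyRange 0 (matrix.length : Int) 1).foldl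
            (fun min_ i =>
              let v := PySem.List.pyGetD (PySem.List.pyGetD matrix i []) j 0
              if v < min_ then v else min_)
            min0
        match max_ with
        | none => some min_
        | some m => if m < min_ then some min_ else some m)
      none
  max_.getD 0

-- ===== PORT B =====
-- port of Source B: col_mins starts as matrix[0]; each further row is zipped in element-wise;
-- max(col_mins) is PySem.List.max?; the .getD 0 is only reached outside Pre_ (Python B raises there).
def teacher_version_alt (matrix : List (List Int)) : Int :=
  let colMins :=
    (matrix.drop 1).foldl
      (fun cm row => (cm.zip row).map (fun p => if p.1 ≤ p.2 then p.1 else p.2))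
      (matrix.headD [])
  (PySem.List.max? colMins (fun y => y)).getD 0

-- ===== PRECONDITION & SPEC =====
-- Pre_ excludes: the empty matrix and ragged matrices with a row shorter than row 0 (A raises
-- IndexError), and matrices whose first row is empty, on which A returns None — not an Int.
def Pre_teacher_version (matrix : List (List Int)) : Prop :=
  matrix ≠ [] ∧ matrix.headD [] ≠ [] ∧ ∀ row ∈ matrix, (matrix.headD []).length ≤ row.length
instance (matrix : List (List Int)) : Decidable (Pre_teacher_version matrix) := by
  unfold Pre_teacher_version; infer_instance
def pvWitness_teacher_version : List (List Int) := [[3, -1, 4], [1, 5, -9]]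
def Spec_teacher_version (matrix : List (List Int)) (out : Int) : Prop := out = teacher_version_alt matrix
instance (matrix : List (List Int)) (out : Int) : Decidable (Spec_teacher_version matrix out) := by unfold Spec_teacher_version; infer_instance

-- ===== CLAIM (what is proved, stated in full; the proofs are below) =====
def Claim_equal_teacher_version : Prop := ∀ (matrix : List (List Int)), Dom_teacher_version matrix → Pre_teacher_version matrix → Spec_teacher_version matrix (teacher_version matrix)

-- ===== LEMMAS AND PROOFS =====

-- length of the running column-minimums table is preserved by B's fold
theorem colMins_length (rest : List (List Int)) (cm : List Int)
    (h : ∀ row ∈ rest, cm.length ≤ row.length) :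
    (rest.foldl (fun cm row => (cm.zip row).map (fun p => if p.1 ≤ p.2 then p.1 else p.2)) cm).length
      = cm.length := by
  induction rest generalizing cm with
  | nil => rfl
  | cons r rs ih =>
      have hr : cm.length ≤ r.length := h r (by simp)
      have hz : ((cm.zip r).map (fun p => if p.1 ≤ p.2 then p.1 else p.2)).length = cm.length := by
        simp [Nat.min_eq_left hr]
      rw [List.foldl_cons, ih _ (by intro row hrow; rw [hz]; exact h row (by simp [hrow])), hz]

-- entry j of the table = the column-j running-minimum fold over the rows
theorem colMins_getD (rest : List (List Int)) (cm : List Int) (j : Nat)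
    (hj : j < cm.length) (h : ∀ row ∈ rest, cm.length ≤ row.length) :
    (rest.foldl (fun cm row => (cm.zip row).map (fun p => if p.1 ≤ p.2 then p.1 else p.2)) cm).getD j 0
      = rest.foldl (fun m row => if m ≤ row.getD j 0 then m else row.getD j 0) (cm.getD j 0) := by
  induction rest generalizing cm with
  | nil => rfl
  | cons r rs ih =>
      have hr : cm.length ≤ r.length := h r (by simp)
      have hz : ((cm.zip r).map (fun p => if p.1 ≤ p.2 then p.1 else p.2)).length = cm.length := by
        simp [Nat.min_eq_left hr]
      have hstep : ((cm.zip r).map (fun p => if p.1 ≤ p.2 then p.1 else p.2)).getD j 0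
          = if cm.getD j 0 ≤ r.getD j 0 then cm.getD j 0 else r.getD j 0 := by
        have hjz : j < ((cm.zip r).map (fun p => if p.1 ≤ p.2 then p.1 else p.2)).length := by omega
        rw [List.getD_eq_getElem _ _ hjz, List.getElem_map, List.getElem_zip,
            List.getD_eq_getElem _ _ hj, List.getD_eq_getElem _ _ (by omega : j < r.length)]
      rw [List.foldl_cons, ih _ (by omega) (by intro row hrow; rw [hz]; exact h row (by simp [hrow])),
          hstep, List.foldl_cons]

-- an Option-accumulator running max (A's max_ loop) is `some` of the plain running max
theorem optFold_max (t : List Int) (m : Int) :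
    t.foldl (fun mx v => match mx with
                         | none => some v
                         | some m => if m < v then some v else some m) (some m)
      = some (t.foldl max m) := by
  induction t generalizing m with
  | nil => rfl
  | cons v vs ih =>
      simp only [List.foldl_cons]
      rw [show (if m < v then some v else some m) = some (max m v) from by
            split_ifs with h
            · rw [max_eq_right h.le]
            · rw [max_eq_left (not_lt.mp h)], ih]

theorem teacher_version_eq (r0 : List Int) (rest : List (List Int)) (h0 : r0 ≠ [])
    (hlen : ∀ row ∈ rest, r0.length ≤ row.length) :
    teacher_version (r0 :: rest) = teacher_version_alt (r0 :: rest) := by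
  unfold teacher_version teacher_version_alt
  simp only [PySem.List.pyGetD_zero_cons, List.headD_cons, List.drop_one, List.tail_cons]
  set colMins := rest.foldl
      (fun cm row => (cm.zip row).map (fun p => if p.1 ≤ p.2 then p.1 else p.2)) r0 with hcol
  have hL : colMins.length = r0.length := colMins_length rest r0 hlen
  rw [PySem.List.foldl_congr_mem _ _
        (fun (max_ : Option Int) (j : Int) =>
          match max_ with
          | none => some (PySem.List.pyGetD colMins j 0)
          | some m => if m < PySem.List.pyGetD colMins j 0
                      then some (PySem.List.pyGetD colMins j 0) else some m) none ?hb]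
  case hb =>
    intro acc j hj
    rw [PySem.List.mem_pyRange_one] at hj
    have hj' : j.toNat < r0.length := by omega
    have hgetr0 : PySem.List.pyGetD r0 j 0 = r0.getD j.toNat 0 := by
      rw [PySem.List.pyGetD_eq_getElem r0 0 hj.1 (by omega),
          List.getD_eq_getElem _ _ hj']
    have hinner :
        List.foldl
            (fun min_ i =>
              if PySem.List.pyGetD (PySem.List.pyGetD (r0 :: rest) i []) j 0 < min_ then
                PySem.List.pyGetD (PySem.List.pyGetD (r0 :: rest) i []) j 0
              else min_)
            (PySem.List.pyGetD r0 j 0)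
            (PySem.List.pyRange 0 ((r0 :: rest).length : Int))
          = PySem.List.pyGetD colMins j 0 := by
      rw [PySem.List.foldl_pyRange_zero_pyGetD' (r0 :: rest) []
            (fun min_ row =>
              if PySem.List.pyGetD row j 0 < min_ then PySem.List.pyGetD row j 0 else min_)
            (PySem.List.pyGetD r0 j 0)]
      rw [List.foldl_cons, hgetr0, if_neg (lt_irrefl _)]
      have hcongr : rest.foldl
            (fun min_ row =>
              if PySem.List.pyGetD row j 0 < min_ then PySem.List.pyGetD row j 0 else min_)
            (r0.getD j.toNat 0)
          = rest.foldl (fun m row => if m ≤ row.getD j.toNat 0 then m else row.getD j.toNat 0)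
              (r0.getD j.toNat 0) := by
        refine PySem.List.foldl_congr_mem _ _ _ _ ?_
        intro acc row hrow
        have hg : PySem.List.pyGetD row j 0 = row.getD j.toNat 0 := by
          rw [PySem.List.pyGetD_eq_getElem row 0 hj.1
                (by have := hlen row hrow; omega),
              List.getD_eq_getElem _ _ (by have := hlen row hrow; omega)]
        rw [hg]; split_ifs <;> omega
      rw [hcongr, ← colMins_getD rest r0 j.toNat hj' hlen, ← hcol,
          PySem.List.pyGetD_eq_getElem colMins 0 hj.1 (by omega),
          List.getD_eq_getElem _ _ (by omega : j.toNat < colMins.length)]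
    simp only [hinner]
  have hw : (r0.length : Int) = (colMins.length : Int) := by rw [hL]
  rw [hw, PySem.List.foldl_pyRange_zero_pyGetD' colMins 0
        (fun (max_ : Option Int) (v : Int) =>
          match max_ with
          | none => some v
          | some m => if m < v then some v else some m) none]
  have hcne : colMins ≠ [] := by
    intro hnil
    rw [hnil] at hL
    cases r0 with
    | nil => exact h0 rfl
    | cons a l => simp at hL
  obtain ⟨c, t, hct⟩ := List.exists_cons_of_ne_nil hcne
  rw [hct, List.foldl_cons, optFold_max, PySem.List.max?_id_cons]

-- ===== VERDICT (by name: the statement is the Claim_ definition above) =====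
theorem teacher_version_spec : Claim_equal_teacher_version := by
  intro matrix _ hpre
  obtain ⟨hne, h0, hlen⟩ := hpre
  unfold Spec_teacher_version
  cases matrix with
  | nil => exact absurd rfl hne
  | cons r0 rest =>
      exact teacher_version_eq r0 rest (by simpa using h0)
        (fun row hrow => by simpa using hlen row (by simp [hrow]))
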